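-- pv_equiv track=rewrite | github.com/jie810731/taipei-sport-booking | book.py | getTotalFeed
-- ===== SOURCE A (Python) =====
-- def getTotalFeed(book_times):
--     total_feed = 0
--     for book_time in book_times :
--         if int(book_time) < 10:
--             total_feed += 150
--
--             continue
--         if int(book_time) < 18:
--             total_feed += 300
--
--             continue
--
--         total_feed += 500
--
--     return str(total_feed)
-- ===== SOURCE B (Python) =====
-- def getTotalFeed(book_times):
--     n = len(book_times)
--     early = sum(1 for t in book_times if int(t) < 10)
--     mid = sum(1 for t in book_times if int(t) < 18) - early
--     return str(150 * early + 300 * mid + 500 * (n - early - mid))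
-- ===== Notes on version B (the rewrite author's own statement) =====
-- stated objective: alternative
-- what changed: Replaces A's single pass that accumulates a per-item fee via an if/continue chain with staged counting passes (count items below each threshold) followed by one closed-form arithmetic expression 150*early + 300*mid + 500*rest.
import Mathlib
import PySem

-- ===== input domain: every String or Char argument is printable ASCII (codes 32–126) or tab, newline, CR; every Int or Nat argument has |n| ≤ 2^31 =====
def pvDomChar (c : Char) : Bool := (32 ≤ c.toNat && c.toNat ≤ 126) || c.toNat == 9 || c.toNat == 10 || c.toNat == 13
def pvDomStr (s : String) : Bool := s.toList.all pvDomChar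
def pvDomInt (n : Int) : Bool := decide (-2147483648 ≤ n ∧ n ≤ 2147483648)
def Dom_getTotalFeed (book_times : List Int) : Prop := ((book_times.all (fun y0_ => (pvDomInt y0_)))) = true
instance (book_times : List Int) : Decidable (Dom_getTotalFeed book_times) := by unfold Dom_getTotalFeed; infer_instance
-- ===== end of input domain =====

-- B replaces A's per-item fee accumulation (if/continue chain in one pass) with staged
-- counting passes per tier and one closed-form arithmetic expression (objective: alternative).

-- ===== PORT A =====
def getTotalFeed (book_times : List Int) : String :=
  PySem.Int.toStr
    (book_times.foldl
      (fun total_feed book_time =>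
        if book_time < 10 then total_feed + 150
        else if book_time < 18 then total_feed + 300
        else total_feed + 500)
      0)

-- ===== PORT B =====
def getTotalFeed_alt (book_times : List Int) : String :=
  let n : Int := book_times.length
  let early : Int := (book_times.countP (fun t => t < 10) : Nat)
  let mid : Int := ((book_times.countP (fun t => t < 18) : Nat) : Int) - early
  PySem.Int.toStr (150 * early + 300 * mid + 500 * (n - early - mid))

-- ===== PRECONDITION & SPEC =====
def Spec_getTotalFeed (book_times : List Int) (out : String) : Prop := out = getTotalFeed_alt book_times
instance (book_times : List Int) (out : String) : Decidable (Spec_getTotalFeed book_times out) := by unfold Spec_getTotalFeed; infer_instance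

-- ===== CLAIM (what is proved, stated in full; the proofs are below) =====
def Claim_equal_getTotalFeed : Prop := ∀ (book_times : List Int), Dom_getTotalFeed book_times → Spec_getTotalFeed book_times (getTotalFeed book_times)

-- ===== LEMMAS AND PROOFS =====
theorem pv_foldl_eq (book_times : List Int) : ∀ (init : Int),
    book_times.foldl
      (fun total_feed book_time =>
        if book_time < 10 then total_feed + 150
        else if book_time < 18 then total_feed + 300
        else total_feed + 500) init
    = init + 150 * ((book_times.countP (fun t => t < 10) : Nat) : Int)
        + 300 * (((book_times.countP (fun t => t < 18) : Nat) : Int)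
                 - ((book_times.countP (fun t => t < 10) : Nat) : Int))
        + 500 * ((book_times.length : Int)
                 - ((book_times.countP (fun t => t < 18) : Nat) : Int)) := by
  induction book_times with
  | nil => intro init; simp
  | cons b t ih =>
    intro init
    simp only [List.foldl_cons, List.countP_cons, List.length_cons, ih]
    by_cases h1 : b < 10 <;> by_cases h2 : b < 18 <;>
      simp [h1, h2] <;> omega

theorem getTotalFeed_spec : Claim_equal_getTotalFeed := by
  intro book_times _
  unfold Spec_getTotalFeed getTotalFeed getTotalFeed_alt
  rw [pv_foldl_eq]
  push_cast
  ring_nf
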